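-- pv_equiv track=rewrite | github.com/LTD-project/sp-dataset | 简化后/main2.py | _select_validation_trial
-- ===== SOURCE A (Python) =====
-- def _select_validation_trial(trials, held_out_trial):
--     same_object_trials = [t for t in trials if t[0] == held_out_trial[0]]
--     if len(same_object_trials) > 1:
--         for t in same_object_trials:
--             if t != held_out_trial: return t
--     for t in trials:
--         if t != held_out_trial: return t
--     raise ValueError("No available trials for validation.")
-- ===== SOURCE B (Python) =====
-- def _select_validation_trial(trials, held_out_trial):
--     # Single pass: count same-object trials and remember the first same-object
--     # differing trial and the first differing trial overall.
--     same_count = 0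
--     same_diff = None
--     any_diff = None
--     for t in trials:
--         if t[0] == held_out_trial[0]:
--             same_count += 1
--             if same_diff is None and t != held_out_trial:
--                 same_diff = t
--         if any_diff is None and t != held_out_trial:
--             any_diff = t
--     if same_count > 1 and same_diff is not None:
--         return same_diff
--     if any_diff is not None:
--         return any_diff
--     raise ValueError("No available trials for validation.")
-- ===== Notes on version B (the rewrite author's own statement) =====
-- stated objective: alternative
-- what changed: Replaces A's intermediate same-object list plus up to three scans with one fold over trials maintaining a same-object counter and the two first differing candidates.
import Mathlib
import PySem

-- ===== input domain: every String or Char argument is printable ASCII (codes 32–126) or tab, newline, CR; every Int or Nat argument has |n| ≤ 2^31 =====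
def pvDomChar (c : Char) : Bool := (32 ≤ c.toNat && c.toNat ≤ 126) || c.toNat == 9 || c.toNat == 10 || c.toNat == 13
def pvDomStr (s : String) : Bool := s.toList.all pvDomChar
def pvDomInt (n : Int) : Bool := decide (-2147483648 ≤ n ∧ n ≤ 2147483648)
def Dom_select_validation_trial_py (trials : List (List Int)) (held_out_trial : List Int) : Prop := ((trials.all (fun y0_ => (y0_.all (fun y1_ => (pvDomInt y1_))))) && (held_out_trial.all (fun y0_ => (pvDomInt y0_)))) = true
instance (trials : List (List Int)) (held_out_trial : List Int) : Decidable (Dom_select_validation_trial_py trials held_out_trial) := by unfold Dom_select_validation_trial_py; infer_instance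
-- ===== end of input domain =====

-- B replaces A's intermediate same-object list and multiple scans by a single fold keeping a
-- same-object counter and the first differing candidates (alternative decomposition, same cost).


-- ===== PORT A =====
def select_validation_trial_py (trials : List (List Int)) (held_out_trial : List Int) : List Int :=
  -- same_object_trials = [t for t in trials if t[0] == held_out_trial[0]]
  let same_object_trials := trials.filter (fun t => PySem.List.pyGet? t 0 == PySem.List.pyGet? held_out_trial 0)
  if same_object_trials.length > 1 then
    match same_object_trials.find? (fun t => t != held_out_trial) with
    | some t => t
    | none =>
      match trials.find? (fun t => t != held_out_trial) with
      | some t => t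
      | none => []  -- Python raises ValueError here; excluded by Pre_
  else
    match trials.find? (fun t => t != held_out_trial) with
    | some t => t
    | none => []  -- Python raises ValueError here; excluded by Pre_

-- ===== PORT B =====
-- loop body of B: update (same_count, same_diff, any_diff) with one trial
def svtStep (held_out_trial : List Int) (st : Nat × Option (List Int) × Option (List Int)) (t : List Int) : Nat × Option (List Int) × Option (List Int) :=
  let same := PySem.List.pyGet? t 0 == PySem.List.pyGet? held_out_trial 0
  let cnt := if same then st.1 + 1 else st.1
  let same_diff := if st.2.1.isNone && same && (t != held_out_trial) then some t else st.2.1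
  let any_diff := if st.2.2.isNone && (t != held_out_trial) then some t else st.2.2
  (cnt, same_diff, any_diff)

def select_validation_trial_py_alt (trials : List (List Int)) (held_out_trial : List Int) : List Int :=
  let st := trials.foldl (svtStep held_out_trial) (0, none, none)
  if st.1 > 1 && st.2.1.isSome then
    st.2.1.getD []
  else
    st.2.2.getD []  -- none means Python raises ValueError; excluded by Pre_

-- ===== PRECONDITION & SPEC =====
-- Pre_ excludes exactly the inputs on which A raises: an IndexError from t[0]/held_out_trial[0]
-- (an empty trial, or empty held_out_trial with trials nonempty) and the ValueError when no trial differs.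
def Pre_select_validation_trial_py (trials : List (List Int)) (held_out_trial : List Int) : Prop :=
  held_out_trial ≠ [] ∧ (∀ t ∈ trials, t ≠ []) ∧ (∃ t ∈ trials, t ≠ held_out_trial)
instance (trials : List (List Int)) (held_out_trial : List Int) : Decidable (Pre_select_validation_trial_py trials held_out_trial) := by unfold Pre_select_validation_trial_py; infer_instance
def pvWitness_select_validation_trial_py : List (List Int) × List Int := ([[1, 2], [1, 3]], [1, 2])
def Spec_select_validation_trial_py (trials : List (List Int)) (held_out_trial : List Int) (out : List Int) : Prop := out = select_validation_trial_py_alt trials held_out_trial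
instance (trials : List (List Int)) (held_out_trial : List Int) (out : List Int) : Decidable (Spec_select_validation_trial_py trials held_out_trial out) := by unfold Spec_select_validation_trial_py; infer_instance

-- ===== CLAIM (what is proved, stated in full; the proofs are below) =====
def Claim_equal_select_validation_trial_py : Prop := ∀ (trials : List (List Int)) (held_out_trial : List Int), Dom_select_validation_trial_py trials held_out_trial → Pre_select_validation_trial_py trials held_out_trial → Spec_select_validation_trial_py trials held_out_trial (select_validation_trial_py trials held_out_trial)

-- ===== LEMMAS AND PROOFS =====
-- the fold of B computes: count of same-object trials, first same-object differing trial, first differing trial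
theorem svt_foldl (held_out_trial : List Int) (ts : List (List Int)) :
    ∀ (cnt : Nat) (s a : Option (List Int)),
      ts.foldl (svtStep held_out_trial) (cnt, s, a) =
        (cnt + (ts.filter (fun t => PySem.List.pyGet? t 0 == PySem.List.pyGet? held_out_trial 0)).length,
         s.or ((ts.filter (fun t => PySem.List.pyGet? t 0 == PySem.List.pyGet? held_out_trial 0)).find? (fun t => t != held_out_trial)),
         a.or (ts.find? (fun t => t != held_out_trial))) := by
  induction ts with
  | nil => intro cnt s a; simp
  | cons t ts ih =>
    intro cnt s a
    simp only [List.foldl_cons, svtStep, List.filter_cons, List.find?]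
    by_cases hsame : (PySem.List.pyGet? t 0 == PySem.List.pyGet? held_out_trial 0) = true <;>
    by_cases hdiff : (t != held_out_trial) = true <;>
    cases s <;> cases a <;>
      simp [ih, hsame, hdiff, Option.or, Nat.add_assoc, Nat.add_comm 1]

-- ===== VERDICT (by name: the statement is the Claim_ definition above) =====
theorem select_validation_trial_py_spec : Claim_equal_select_validation_trial_py := by
  intro trials held_out_trial _ _
  unfold Spec_select_validation_trial_py select_validation_trial_py select_validation_trial_py_alt
  rw [svt_foldl]
  set p := fun t => PySem.List.pyGet? t 0 == PySem.List.pyGet? held_out_trial 0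
  set q := fun t => t != held_out_trial
  by_cases hlen : (trials.filter p).length > 1 <;>
    cases hfs : (trials.filter p).find? q <;>
    cases hfa : trials.find? q <;>
      simp [hlen, hfs, Option.or]
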